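-- pv_equiv track=rewrite | github.com/SajinKowserSK/algorithms-practice | leetcode old&new/957. Prison Cells After N days.py | prisonAfterNDays
-- ===== SOURCE A (Python) =====
-- from typing import List
--
-- def prisonAfterNDays(cells: List[int], N: int) -> List[int]:
--
--     i = N
--     seen = {}
--
--     while i:
--
--         check = tuple(cells)
--
--         if check in seen:
--             # we want to go close to 0 or see what's left until we reach 0
--             # so we have to use mod to get a remainder
--             # what we mod by should be the difference between
--             # the last place we saw this occurence and where we are now AKA the cycle is everything in between (will repeat)
--
--             i %= seen[check] - i
--
--         seen[check] = i
--
--         if i > 0: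
--             tmp = [0] * len(cells)
--
--             for x in range(1, len(cells) - 1):
--                 if cells[x - 1] == cells[x + 1]:
--                     tmp[x] = 1
--
--                 else:
--                     tmp[x] = 0
--
--             cells = tmp
--             i = i - 1
--
--     return cells
-- ===== SOURCE B (Python) =====
-- from typing import List
--
-- def prisonAfterNDays(cells: List[int], N: int) -> List[int]:
--     # Forward simulation: record every state and the index at which it was first
--     # seen; on the first repeat, jump into the cycle with index arithmetic.
--     if N <= 0:
--         return list(cells)
--     n = len(cells)
--     states = [list(cells)]
--     first_seen = {tuple(cells): 0}
--     while len(states) <= N: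
--         prev = states[-1]
--         nxt = [1 if 0 < x < n - 1 and prev[x - 1] == prev[x + 1] else 0
--                for x in range(n)]
--         key = tuple(nxt)
--         if key in first_seen:
--             p = first_seen[key]
--             cycle = len(states) - p
--             return states[p + (N - p) % cycle]
--         first_seen[key] = len(states)
--         states.append(nxt)
--     return states[N]
-- ===== Notes on version B (the rewrite author's own statement) =====
-- stated objective: alternative
-- what changed: A counts days DOWN with a dict of remaining-day marks and performs an in-place modular jump (i %= seen[check] - i) when a state recurs; B simulates FORWARD, keeping the list of all states with a first-seen index dict, and on the first repeat returns states[p + (N - p) % cycle] directly.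
import Mathlib
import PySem

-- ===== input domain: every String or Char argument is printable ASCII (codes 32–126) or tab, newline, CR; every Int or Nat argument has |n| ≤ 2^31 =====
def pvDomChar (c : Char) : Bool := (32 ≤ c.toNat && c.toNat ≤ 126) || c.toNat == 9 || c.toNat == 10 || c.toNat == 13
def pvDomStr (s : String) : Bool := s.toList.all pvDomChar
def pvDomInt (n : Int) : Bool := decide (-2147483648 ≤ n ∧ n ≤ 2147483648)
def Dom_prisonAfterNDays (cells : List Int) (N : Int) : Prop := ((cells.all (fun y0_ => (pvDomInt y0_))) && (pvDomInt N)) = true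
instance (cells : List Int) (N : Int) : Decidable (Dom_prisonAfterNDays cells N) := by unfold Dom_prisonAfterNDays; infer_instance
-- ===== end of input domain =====

-- B replaces A's backward countdown (over a dict of remaining-day marks, with an in-place
-- modular jump) by a forward simulation that records every state with its first index and
-- jumps into the detected cycle once; same results, a different decomposition.

-- ===== PORT A =====
-- the inner 'for x in range(1, len(cells)-1)' loop building tmp
def stepA (cells : List Int) : List Int :=
  (PySem.List.pyRange 1 (PySem.List.len cells - 1) 1).foldl
    (fun tmp x =>
      PySem.List.pySetD tmp x
        (if PySem.List.pyGetD cells (x - 1) 0 = PySem.List.pyGetD cells (x + 1) 0 then (1 : Int) else 0))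
    (List.replicate cells.length 0)

-- the 'while i:' loop; fuel only makes the recursion total, it never runs out when 0 ≤ i (proved below)
def loopA (fuel : Nat) (cells : List Int) (i : Int) (seen : PySem.Dict (List Int) Int) : List Int :=
  match fuel with
  | 0 => cells
  | fuel + 1 =>
    if i = 0 then cells
    else
      let i1 := match seen.get? cells with
        | some j => PySem.Int.mod i (j - i)
        | none => i
      let seen1 := seen.insert cells i1
      if 0 < i1 then loopA fuel (stepA cells) (i1 - 1) seen1
      else cells

def prisonAfterNDays (cells : List Int) (N : Int) : List Int :=
  loopA (N.toNat + 1) cells N PySem.Dict.empty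

-- ===== PORT B =====
-- the list comprehension building nxt
def stepB (n : Nat) (prev : List Int) : List Int :=
  (PySem.List.pyRange 0 (n : Int) 1).map fun x =>
    if 0 < x ∧ x < (n : Int) - 1 ∧ PySem.List.pyGetD prev (x - 1) 0 = PySem.List.pyGetD prev (x + 1) 0
    then (1 : Int) else 0

-- the 'while len(states) <= N' loop; fuel only makes the recursion total (never runs out, proved below)
def loopB (fuel : Nat) (n : Nat) (N : Int) (states : List (List Int))
    (seen : PySem.Dict (List Int) Int) : List Int :=
  match fuel with
  | 0 => []
  | fuel + 1 =>
    if (states.length : Int) ≤ N then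
      let prev := PySem.List.pyGetD states (-1) []
      let nxt := stepB n prev
      match seen.get? nxt with
      | some p =>
        let cycle := (states.length : Int) - p
        PySem.List.pyGetD states (p + PySem.Int.mod (N - p) cycle) []
      | none => loopB fuel n N (states ++ [nxt]) (seen.insert nxt (states.length : Int))
    else PySem.List.pyGetD states N []

def prisonAfterNDays_alt (cells : List Int) (N : Int) : List Int :=
  if N ≤ 0 then cells
  else loopB (N.toNat + 1) cells.length N [cells] (PySem.Dict.empty.insert cells 0)

-- ===== PRECONDITION & SPEC =====
-- Pre_ excludes exactly N < 0, where A raises ZeroDivisionError (i %= seen[check] - i with a zero difference).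
def Pre_prisonAfterNDays (cells : List Int) (N : Int) : Prop := 0 ≤ N
instance (cells : List Int) (N : Int) : Decidable (Pre_prisonAfterNDays cells N) := by
  unfold Pre_prisonAfterNDays; infer_instance

def pvWitness_prisonAfterNDays : List Int × Int := ([1, 0, 0, 1], 3)

def Spec_prisonAfterNDays (cells : List Int) (N : Int) (out : List Int) : Prop :=
  out = prisonAfterNDays_alt cells N
instance (cells : List Int) (N : Int) (out : List Int) : Decidable (Spec_prisonAfterNDays cells N out) := by
  unfold Spec_prisonAfterNDays; infer_instance

-- ===== CLAIM (what is proved, stated in full; the proofs are below) =====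
def Claim_equal_prisonAfterNDays : Prop := ∀ (cells : List Int) (N : Int),
  Dom_prisonAfterNDays cells N → Pre_prisonAfterNDays cells N →
  Spec_prisonAfterNDays cells N (prisonAfterNDays cells N)

-- ===== LEMMAS AND PROOFS =====

-- canonical one-day step, used only by the proofs
def stepC (c : List Int) : List Int :=
  (List.range c.length).map fun x =>
    if 0 < x ∧ x + 1 < c.length ∧ c.getD (x - 1) 0 = c.getD (x + 1) 0 then (1 : Int) else 0

lemma length_stepC (c : List Int) : (stepC c).length = c.length := by
  simp [stepC]

lemma length_iter_stepC (k : Nat) (c : List Int) : (stepC^[k] c).length = c.length := by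
  induction k generalizing c with
  | zero => rfl
  | succ k ih => rw [Function.iterate_succ_apply, ih, length_stepC]

-- the effect of A's write loop: a foldl of List.set over range, as an explicit map
lemma fold_set (v : Nat → Int) (n : Nat) : ∀ r, r + 1 ≤ n →
    (List.range r).foldl (fun tmp k => tmp.set (k + 1) (v (k + 1))) (List.replicate n (0 : Int))
      = (List.range n).map (fun x => if 1 ≤ x ∧ x < r + 1 then v x else 0) := by
  intro r
  induction r with
  | zero =>
    intro _
    apply List.ext_getElem
    · simp
    · intro x h1 h2
      simp only [List.range_zero, List.foldl_nil, List.getElem_replicate, List.getElem_map,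
        List.getElem_range]
      split
      · omega
      · rfl
  | succ r ih =>
    intro hr
    rw [List.range_succ, List.foldl_append, ih (by omega), List.foldl_cons, List.foldl_nil]
    apply List.ext_getElem
    · simp
    · intro x h1 h2
      rw [List.getElem_set]
      simp only [List.getElem_map, List.getElem_range]
      have hx : x < n := by simpa using h1
      split
      · rename_i hxr
        rw [if_pos (by omega)]
        rw [hxr]
      · split <;> split <;> first | rfl | omega

lemma stepA_eq_stepC (c : List Int) : stepA c = stepC c := by
  rcases c with _ | ⟨a, c'⟩
  · rfl
  · set c : List Int := a :: c' with hc
    have hn : 0 < c.length := by simp [hc]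
    have hfun : ∀ (tmp : List Int) (k : Nat),
        PySem.List.pySetD tmp (1 + (k : Int))
          (if PySem.List.pyGetD c (1 + (k : Int) - 1) 0 = PySem.List.pyGetD c (1 + (k : Int) + 1) 0
           then (1 : Int) else 0)
        = tmp.set (k + 1) (if c.getD (k + 1 - 1) 0 = c.getD (k + 1 + 1) 0 then (1 : Int) else 0) := by
      intro tmp k
      have e1 : 1 + (k : Int) = ((k + 1 : Nat) : Int) := by push_cast; ring
      have e2 : 1 + (k : Int) - 1 = ((k : Nat) : Int) := by ring
      have e3 : 1 + (k : Int) + 1 = ((k + 2 : Nat) : Int) := by push_cast; ring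
      rw [e2, e3, e1, PySem.List.pySetD_natCast, PySem.List.pyGetD_natCast,
        PySem.List.pyGetD_natCast]
      norm_num
    have hrange : PySem.List.pyRange 1 (PySem.List.len c - 1) 1
        = (List.range (c.length - 2)).map (fun k : Nat => 1 + (k : Int)) := by
      have hcnt : ((c.length : Int) - 1 - 1).toNat = c.length - 2 := by omega
      rw [PySem.List.len_eq, PySem.List.pyRange_one, hcnt]
    rw [stepA, hrange, List.foldl_map]
    simp only [hfun]
    rw [fold_set (fun x => if c.getD (x - 1) 0 = c.getD (x + 1) 0 then (1 : Int) else 0)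
      c.length (c.length - 2) (by omega)]
    apply List.ext_getElem
    · simp [stepC]
    · intro x h1 h2
      simp only [List.getElem_map, List.getElem_range, stepC]
      have hx : x < c.length := by simpa using h1
      by_cases hcond : 0 < x ∧ x + 1 < c.length
      · rw [if_pos (by omega : 1 ≤ x ∧ x < c.length - 2 + 1)]
        by_cases he : c.getD (x - 1) 0 = c.getD (x + 1) 0
        · rw [if_pos he, if_pos ⟨hcond.1, hcond.2, he⟩]
        · rw [if_neg he, if_neg (by tauto)]
      · rw [if_neg (by omega), if_neg (by tauto)]

lemma stepB_eq_stepC (n : Nat) (prev : List Int) (h : prev.length = n) :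
    stepB n prev = stepC prev := by
  subst h
  rw [stepB, stepC, PySem.List.pyRange_zero_nat, List.map_map]
  apply List.map_congr_left
  intro k hk
  have hkn : k < prev.length := List.mem_range.mp hk
  simp only [Function.comp_apply]
  by_cases hcond : 0 < k ∧ k + 1 < prev.length
  · have e2 : (k : Int) - 1 = ((k - 1 : Nat) : Int) := by omega
    have e3 : (k : Int) + 1 = ((k + 1 : Nat) : Int) := by omega
    rw [e2, e3, PySem.List.pyGetD_natCast, PySem.List.pyGetD_natCast]
    by_cases he : prev.getD (k - 1) 0 = prev.getD (k + 1) 0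
    · rw [if_pos ⟨by omega, by omega, he⟩, if_pos ⟨hcond.1, hcond.2, he⟩]
    · rw [if_neg (by rintro ⟨-, -, h3⟩; exact he h3), if_neg (by rintro ⟨-, -, h3⟩; exact he h3)]
  · rw [if_neg (by rintro ⟨g1, g2, -⟩; omega), if_neg (by rintro ⟨g1, g2, -⟩; omega)]

-- running q whole periods from a point ≥ t changes nothing
lemma iter_per_mul (c0 : List Int) (t L : Nat)
    (hP : ∀ m, t ≤ m → stepC^[m + L] c0 = stepC^[m] c0) :
    ∀ q m, t ≤ m → stepC^[m + q * L] c0 = stepC^[m] c0 := by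
  intro q
  induction q with
  | zero => simp
  | succ q ih =>
    intro m hm
    have : m + (q + 1) * L = (m + q * L) + L := by ring
    rw [this, hP _ (by omega), ih m hm]

lemma loopA_correct (c0 : List Int) : ∀ (fuel t : Nat) (i : Int)
    (seen : PySem.Dict (List Int) Int), 0 ≤ i → i.toNat < fuel →
    (∀ s j, seen.get? s = some j → i < j ∧ ∃ ts e, ts ≤ t ∧ s = stepC^[ts] c0 ∧
      ts + j.toNat = t + i.toNat + e ∧ ∀ m, t ≤ m → stepC^[m + e] c0 = stepC^[m] c0) →
    loopA fuel (stepC^[t] c0) i seen = stepC^[t + i.toNat] c0 := by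
  intro fuel
  induction fuel with
  | zero => intro t i seen hi hfuel _; omega
  | succ fuel ih =>
    intro t i seen hi hfuel hseen
    by_cases hiz : i = 0
    · subst hiz
      simp [loopA]
    · have hipos : 0 < i := lt_of_le_of_ne hi (Ne.symm hiz)
      have hstep : stepA (stepC^[t] c0) = stepC^[t + 1] c0 := by
        rw [stepA_eq_stepC]
        exact (Function.iterate_succ_apply' stepC t c0).symm
      simp only [loopA, if_neg hiz]
      rcases hget : seen.get? (stepC^[t] c0) with _ | j
      · -- state not seen before: register it and take one step
        show (if 0 < i then
            loopA fuel (stepA (stepC^[t] c0)) (i - 1) (seen.insert (stepC^[t] c0) i)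
          else stepC^[t] c0) = stepC^[t + i.toNat] c0
        rw [if_pos hipos, hstep]
        have hrec := ih (t + 1) (i - 1) (seen.insert (stepC^[t] c0) i) (by omega) (by omega) ?_
        · rw [hrec]
          congr 1
          omega
        · intro s j hj
          rw [PySem.Dict.get?_insert] at hj
          split at hj
          · rename_i hs
            subst hs
            injection hj with hj
            subst hj
            refine ⟨by omega, t, 0, by omega, rfl, by omega, fun m _ => by simp⟩
          · obtain ⟨h1, ts, e, h2, h3, h4, h5⟩ := hseen _ _ hj
            exact ⟨by omega, ts, e, by omega, h3, by omega, fun m hm => h5 m (by omega)⟩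
      · -- repeated state: modular jump, then (possibly) one step
        obtain ⟨hij, ts, e, hts, hs, harith, hper⟩ := hseen _ _ hget
        have hLposI : (0 : Int) < j - i := by omega
        have hmodI : PySem.Int.mod i (j - i) = ((i.toNat % (j - i).toNat : Nat) : Int) := by
          rw [PySem.Int.mod_eq_emod_of_pos hLposI]
          obtain ⟨b, hb⟩ : ∃ b : Nat, j - i = (b : Int) := ⟨(j - i).toNat, by omega⟩
          obtain ⟨a, ha⟩ : ∃ a : Nat, i = (a : Int) := ⟨i.toNat, by omega⟩
          rw [hb, ha]
          norm_cast
        have hI0 : (0 : Int) ≤ PySem.Int.mod i (j - i) := by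
          rw [hmodI]; exact Int.natCast_nonneg _
        have hItoNat : (PySem.Int.mod i (j - i)).toNat = i.toNat % (j - i).toNat := by
          rw [hmodI, Int.toNat_natCast]
        have hmodle := Nat.mod_le i.toNat (j - i).toNat
        have hdm := Nat.mod_add_div' i.toNat (j - i).toNat
        -- (j - i).toNat is a period of the orbit from time t on
        have hP : ∀ m, t ≤ m → stepC^[m + (j - i).toNat] c0 = stepC^[m] c0 := by
          intro m hm
          have hLe : m + (j - i).toNat = (m + (t - ts)) + e := by omega
          rw [hLe, hper (m + (t - ts)) (by omega)]
          have e1 : stepC^[m + (t - ts)] c0 = stepC^[m - ts] (stepC^[t] c0) := by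
            rw [← Function.iterate_add_apply]
            congr 1
            omega
          rw [e1, hs, ← Function.iterate_add_apply]
          congr 1
          omega
        have hkey : stepC^[t + i.toNat] c0 = stepC^[t + i.toNat % (j - i).toNat] c0 := by
          have h2 : t + i.toNat = (t + i.toNat % (j - i).toNat) + (i.toNat / (j - i).toNat) * (j - i).toNat := by
            omega
          rw [h2, iter_per_mul c0 t (j - i).toNat hP (i.toNat / (j - i).toNat) _ (by omega)]
        by_cases hIpos : 0 < PySem.Int.mod i (j - i)
        · show (if 0 < PySem.Int.mod i (j - i) then
              loopA fuel (stepA (stepC^[t] c0)) (PySem.Int.mod i (j - i) - 1)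
                (seen.insert (stepC^[t] c0) (PySem.Int.mod i (j - i)))
            else stepC^[t] c0) = stepC^[t + i.toNat] c0
          rw [if_pos hIpos, hstep]
          have hrec := ih (t + 1) (PySem.Int.mod i (j - i) - 1)
            (seen.insert (stepC^[t] c0) (PySem.Int.mod i (j - i))) (by omega) (by omega) ?_
          · rw [hrec, hkey]
            congr 1
            omega
          · intro s' j' hj'
            rw [PySem.Dict.get?_insert] at hj'
            split at hj'
            · rename_i hs'
              subst hs'
              injection hj' with hj'
              subst hj'
              refine ⟨by omega, t, 0, by omega, rfl, by omega, fun m _ => by simp⟩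
            · obtain ⟨h1, ts', e', h2, h3, h4, h5⟩ := hseen _ _ hj'
              refine ⟨by omega, ts', e' + (i.toNat - i.toNat % (j - i).toNat), by omega, h3, by omega, ?_⟩
              intro m hm
              have e1 : m + (e' + (i.toNat - i.toNat % (j - i).toNat))
                  = (m + (i.toNat - i.toNat % (j - i).toNat)) + e' := by omega
              rw [e1, h5 _ (by omega)]
              have e2 : m + (i.toNat - i.toNat % (j - i).toNat)
                  = m + (i.toNat / (j - i).toNat) * (j - i).toNat := by omega
              rw [e2, iter_per_mul c0 t (j - i).toNat hP (i.toNat / (j - i).toNat) m (by omega)]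
        · show (if 0 < PySem.Int.mod i (j - i) then
              loopA fuel (stepA (stepC^[t] c0)) (PySem.Int.mod i (j - i) - 1)
                (seen.insert (stepC^[t] c0) (PySem.Int.mod i (j - i)))
            else stepC^[t] c0) = stepC^[t + i.toNat] c0
          rw [if_neg hIpos, hkey]
          have hIz : i.toNat % (j - i).toNat = 0 := by omega
          rw [hIz]
          rfl

lemma iter_fix_mul (s : List Int) (L q : Nat) (hfix : stepC^[L] s = s) :
    stepC^[L * q] s = s := by
  rw [Function.iterate_mul]
  exact Function.iterate_fixed hfix q

lemma iter_mod (s : List Int) (L d : Nat) (hfix : stepC^[L] s = s) :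
    stepC^[d] s = stepC^[d % L] s := by
  conv_lhs => rw [← Nat.mod_add_div d L]
  rw [Function.iterate_add_apply, iter_fix_mul s L (d / L) hfix]

lemma loopB_correct (c0 : List Int) (N : Int) (hN : 0 ≤ N) : ∀ (fuel m : Nat)
    (seen : PySem.Dict (List Int) Int), 0 < m → m ≤ N.toNat + 1 →
    N.toNat + 1 - m < fuel →
    (∀ s p, seen.get? s = some p → 0 ≤ p ∧ p.toNat < m ∧ s = stepC^[p.toNat] c0) →
    loopB fuel c0.length N ((List.range m).map fun k => stepC^[k] c0) seen
      = stepC^[N.toNat] c0 := by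
  intro fuel
  induction fuel with
  | zero => intro m seen _ _ hfuel _; omega
  | succ fuel ih =>
    intro m seen hpos hle hfuel hseen
    have hml : ((List.range m).map fun k => stepC^[k] c0).length = m := by simp
    have hne : (List.range m).map (fun k => stepC^[k] c0) ≠ [] := by
      intro h
      rw [← hml, h] at hpos
      simp at hpos
    have hstate : ∀ k, k < m →
        ((List.range m).map fun k => stepC^[k] c0).getD k [] = stepC^[k] c0 := by
      intro k hk
      simp [List.getD_eq_getElem?_getD, hk]
    have hprev : PySem.List.pyGetD ((List.range m).map fun k => stepC^[k] c0) (-1) []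
        = stepC^[m - 1] c0 := by
      rw [PySem.List.pyGetD_neg_one _ [] hne, List.getLast_eq_getElem]
      simp only [hml]
      rw [List.getElem_map, List.getElem_range]
    have hnxt : stepB c0.length (PySem.List.pyGetD ((List.range m).map fun k => stepC^[k] c0) (-1) [])
        = stepC^[m] c0 := by
      rw [hprev, stepB_eq_stepC _ _ (length_iter_stepC _ _)]
      have h1 : m - 1 + 1 = m := by omega
      conv_rhs => rw [← h1]
      exact (Function.iterate_succ_apply' stepC _ c0).symm
    simp only [loopB, hnxt, hml]
    by_cases hcond : (m : Int) ≤ N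
    · rw [if_pos hcond]
      rcases hget : seen.get? (stepC^[m] c0) with _ | p
      · -- new state: append and recurse
        show loopB fuel c0.length N ((List.range m).map (fun k => stepC^[k] c0) ++ [stepC^[m] c0])
          (seen.insert (stepC^[m] c0) (m : Int)) = stepC^[N.toNat] c0
        have happ : (List.range m).map (fun k => stepC^[k] c0) ++ [stepC^[m] c0]
            = (List.range (m + 1)).map fun k => stepC^[k] c0 := by
          rw [List.range_succ, List.map_append]
          simp
        rw [happ]
        apply ih
        · omega
        · omega
        · omega
        · intro s p hp
          rw [PySem.Dict.get?_insert] at hp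
          split at hp
          · rename_i hs
            subst hs
            injection hp with hp
            subst hp
            exact ⟨Int.natCast_nonneg _, by simp, by simp⟩
          · obtain ⟨h1, h2, h3⟩ := hseen _ _ hp
            exact ⟨h1, by omega, h3⟩
      · -- repeat found: jump into the cycle
        obtain ⟨hp0, hplt, hpeq⟩ := hseen _ _ hget
        show PySem.List.pyGetD ((List.range m).map fun k => stepC^[k] c0)
          (p + PySem.Int.mod (N - p) ((m : Int) - p)) [] = stepC^[N.toNat] c0
        have hcyc : (0 : Int) < (m : Int) - p := by omega
        have hLpos : 0 < m - p.toNat := by omega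
        have hmodeq : p + PySem.Int.mod (N - p) ((m : Int) - p)
            = ((p.toNat + (N.toNat - p.toNat) % (m - p.toNat) : Nat) : Int) := by
          rw [PySem.Int.mod_eq_emod_of_pos hcyc]
          have h1 : N - p = ((N.toNat - p.toNat : Nat) : Int) := by omega
          have h2 : (m : Int) - p = ((m - p.toNat : Nat) : Int) := by omega
          rw [h1, h2, ← Int.natCast_emod]
          push_cast
          omega
        have hidxlt : p.toNat + (N.toNat - p.toNat) % (m - p.toNat) < m := by
          have := Nat.mod_lt (N.toNat - p.toNat) hLpos
          omega
        rw [hmodeq, PySem.List.pyGetD_natCast, hstate _ hidxlt]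
        have hfix : stepC^[m - p.toNat] (stepC^[p.toNat] c0) = stepC^[p.toNat] c0 := by
          rw [← Function.iterate_add_apply, show m - p.toNat + p.toNat = m by omega]
          exact hpeq
        have hsplit : stepC^[N.toNat] c0 = stepC^[N.toNat - p.toNat] (stepC^[p.toNat] c0) := by
          rw [← Function.iterate_add_apply]
          congr 1
          omega
        rw [hsplit, iter_mod _ _ _ hfix, ← Function.iterate_add_apply]
        congr 1
        omega
    · rw [if_neg hcond]
      have hNN : N = ((N.toNat : Nat) : Int) := by omega
      rw [hNN, PySem.List.pyGetD_natCast, hstate _ (by omega), Int.toNat_natCast]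

-- ===== VERDICT (by name: the statement is the Claim_ definition above) =====
theorem prisonAfterNDays_spec : Claim_equal_prisonAfterNDays := by
  intro cells N _ hPre
  unfold Spec_prisonAfterNDays prisonAfterNDays prisonAfterNDays_alt
  have hPre' : (0 : Int) ≤ N := hPre
  rcases eq_or_lt_of_le hPre' with h0 | hpos
  · subst h0
    simp [loopA]
  · rw [if_neg (by omega)]
    have hA : loopA (N.toNat + 1) cells N PySem.Dict.empty = stepC^[N.toNat] cells := by
      have := loopA_correct cells (N.toNat + 1) 0 N PySem.Dict.empty hPre' (by omega)
        (by intro s j hj; simp [PySem.Dict.get?_empty] at hj)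
      simpa using this
    have hB : loopB (N.toNat + 1) cells.length N [cells] (PySem.Dict.empty.insert cells 0)
        = stepC^[N.toNat] cells := by
      have hone : [cells] = (List.range 1).map fun k => stepC^[k] cells := by simp
      rw [hone]
      apply loopB_correct cells N hPre'
      · omega
      · omega
      · omega
      · intro s p hp
        rw [PySem.Dict.get?_insert] at hp
        split at hp
        · rename_i hs
          subst hs
          injection hp with hp
          subst hp
          exact ⟨le_refl 0, by simp, by simp⟩
        · rw [PySem.Dict.get?_empty] at hp
          cases hp
    rw [hA, hB]
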